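-- pv_equiv track=rewrite | github.com/bobbyhiddn/AdventofCode2023 | Days/Day_3/Gear.py | find_horizontal_number
-- ===== SOURCE A (Python) =====
-- def find_horizontal_number(grid, row, col):
--     # Construct the number to the left
--     number_left = ''
--     left = col
--     while left >= 0 and grid[row][left].isdigit():
--         number_left = grid[row][left] + number_left
--         left -= 1
--
--     # Construct the number to the right
--     number_right = ''
--     right = col + 1
--     while right < len(grid[row]) and grid[row][right].isdigit():
--         number_right += grid[row][right]
--         right += 1
--
--     # Combine left and right parts
--     return number_left + number_right if number_left else number_right
-- ===== SOURCE B (Python) =====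
-- def find_horizontal_number(grid, row, col):
--     s = grid[row]
--     # Walk a pointer left past the digits to find the start of the number.
--     i = col
--     while i >= 0 and s[i].isdigit():
--         i -= 1
--     # Build the whole number in a single forward scan from the start.
--     out = []
--     j = i + 1
--     while j < len(s) and s[j].isdigit():
--         out.append(s[j])
--         j += 1
--     return ''.join(out)
-- ===== Notes on version B (the rewrite author's own statement) =====
-- stated objective: simpler
-- what changed: Replaces A's two string-building scans (prepend-building left scan, append-building right scan) and the final conditional join by a non-building left pointer walk that finds the number's start followed by one forward scan that builds the whole result.
import Mathlib
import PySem

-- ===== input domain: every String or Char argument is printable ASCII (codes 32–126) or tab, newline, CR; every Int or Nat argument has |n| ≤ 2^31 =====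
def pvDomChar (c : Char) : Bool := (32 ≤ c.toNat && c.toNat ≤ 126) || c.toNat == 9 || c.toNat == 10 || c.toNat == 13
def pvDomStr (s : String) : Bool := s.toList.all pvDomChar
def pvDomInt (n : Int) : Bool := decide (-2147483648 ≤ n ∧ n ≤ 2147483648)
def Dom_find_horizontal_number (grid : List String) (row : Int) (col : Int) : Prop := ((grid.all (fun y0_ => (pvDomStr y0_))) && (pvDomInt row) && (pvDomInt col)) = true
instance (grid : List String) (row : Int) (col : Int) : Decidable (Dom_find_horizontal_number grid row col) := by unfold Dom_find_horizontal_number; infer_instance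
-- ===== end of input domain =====

-- B replaces A's two string-building scans and final conditional by a pointer walk finding the
-- number's start plus one forward building scan (objective: simpler; same asymptotic cost).

-- ===== PORT A =====
-- A re-reads grid[row] on every access; `pvRowA` is that access ('' default unreachable under Pre_).
def pvRowA (grid : List String) (row : Int) : List Char :=
  ((PySem.List.pyGet? grid row).getD "").toList

-- while left >= 0 and grid[row][left].isdigit(): number_left = grid[row][left] + number_left; left -= 1
def pvLeftA (grid : List String) (row : Int) (left : Int) (number_left : List Char) : List Char :=
  if h : 0 ≤ left ∧ PySem.Chars.isdigit ((PySem.List.pyGet? (pvRowA grid row) left).getD ' ') then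
    pvLeftA grid row (left - 1) (((PySem.List.pyGet? (pvRowA grid row) left).getD ' ') :: number_left)
  else number_left
termination_by (left + 1).toNat
decreasing_by omega

-- while right < len(grid[row]) and grid[row][right].isdigit(): number_right += grid[row][right]; right += 1
def pvRightA (grid : List String) (row : Int) (right : Int) (number_right : List Char) : List Char :=
  if h : right < ((pvRowA grid row).length : Int) ∧ PySem.Chars.isdigit ((PySem.List.pyGet? (pvRowA grid row) right).getD ' ') then
    pvRightA grid row (right + 1) (number_right ++ [((PySem.List.pyGet? (pvRowA grid row) right).getD ' ')])
  else number_right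
termination_by (((pvRowA grid row).length : Int) - right).toNat
decreasing_by omega

def find_horizontal_number (grid : List String) (row : Int) (col : Int) : String :=
  let number_left := pvLeftA grid row col []
  let number_right := pvRightA grid row (col + 1) []
  -- return number_left + number_right if number_left else number_right
  if number_left ≠ [] then String.ofList (number_left ++ number_right) else String.ofList number_right

-- ===== PORT B =====
-- while i >= 0 and s[i].isdigit(): i -= 1   — pointer walk only, returns the start index i + 1
def pvStartB (s : List Char) (i : Int) : Int :=
  if h : 0 ≤ i ∧ PySem.Chars.isdigit ((PySem.List.pyGet? s i).getD ' ') then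
    pvStartB s (i - 1)
  else i + 1
termination_by (i + 1).toNat
decreasing_by omega

-- while j < len(s) and s[j].isdigit(): out.append(s[j]); j += 1
def pvCollectB (s : List Char) (j : Int) (out : List Char) : List Char :=
  if h : j < (s.length : Int) ∧ PySem.Chars.isdigit ((PySem.List.pyGet? s j).getD ' ') then
    pvCollectB s (j + 1) (out ++ [((PySem.List.pyGet? s j).getD ' ')])
  else out
termination_by ((s.length : Int) - j).toNat
decreasing_by omega

def find_horizontal_number_alt (grid : List String) (row : Int) (col : Int) : String :=
  let s := ((PySem.List.pyGet? grid row).getD "").toList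
  String.ofList (pvCollectB s (pvStartB s col) [])

-- ===== PRECONDITION & SPEC =====
-- Pre_ excludes exactly the inputs on which the Python A raises IndexError: row not a valid
-- (possibly negative) index of grid, or col ≥ len(grid[row]), or col ≤ -len(grid[row]) - 2.
def Pre_find_horizontal_number (grid : List String) (row : Int) (col : Int) : Prop :=
  (PySem.List.pyGet? grid row).isSome = true ∧
  -((((PySem.List.pyGet? grid row).getD "").toList.length : Int) + 1) ≤ col ∧
  col < (((PySem.List.pyGet? grid row).getD "").toList.length : Int)
instance (grid : List String) (row : Int) (col : Int) : Decidable (Pre_find_horizontal_number grid row col) := by unfold Pre_find_horizontal_number; infer_instance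

def pvWitness_find_horizontal_number : List String × Int × Int := (["4*12."], 0, 3)

def Spec_find_horizontal_number (grid : List String) (row : Int) (col : Int) (out : String) : Prop := out = find_horizontal_number_alt grid row col
instance (grid : List String) (row : Int) (col : Int) (out : String) : Decidable (Spec_find_horizontal_number grid row col out) := by unfold Spec_find_horizontal_number; infer_instance

-- ===== CLAIM (what is proved, stated in full; the proofs are below) =====
def Claim_equal_find_horizontal_number : Prop := ∀ (grid : List String) (row : Int) (col : Int), Dom_find_horizontal_number grid row col → Pre_find_horizontal_number grid row col → Spec_find_horizontal_number grid row col (find_horizontal_number grid row col)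

-- ===== LEMMAS AND PROOFS =====

-- B's forward scan: the accumulator moves out front.
theorem pvCollectB_acc (s : List Char) (j : Int) (out : List Char) :
    pvCollectB s j out = out ++ pvCollectB s j [] := by
  by_cases h : j < (s.length : Int) ∧ PySem.Chars.isdigit ((PySem.List.pyGet? s j).getD ' ') = true
  · rw [pvCollectB, dif_pos h]
    conv_rhs => rw [pvCollectB, dif_pos h]
    rw [pvCollectB_acc s (j + 1) (out ++ _), pvCollectB_acc s (j + 1) ([] ++ _)]
    simp
  · rw [pvCollectB, dif_neg h]
    conv_rhs => rw [pvCollectB, dif_neg h]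
    simp
termination_by ((s.length : Int) - j).toNat
decreasing_by all_goals omega

-- A's right scan computes exactly B's forward scan over the same row.
theorem pvRightA_eq_collect (grid : List String) (row : Int) (right : Int) (acc : List Char) :
    pvRightA grid row right acc = acc ++ pvCollectB (pvRowA grid row) right [] := by
  by_cases h : right < ((pvRowA grid row).length : Int) ∧ PySem.Chars.isdigit ((PySem.List.pyGet? (pvRowA grid row) right).getD ' ') = true
  · rw [pvRightA, dif_pos h, pvRightA_eq_collect grid row (right + 1)]
    conv_rhs => rw [pvCollectB, dif_pos h, List.nil_append,
      pvCollectB_acc (pvRowA grid row) (right + 1) [((PySem.List.pyGet? (pvRowA grid row) right).getD ' ')]]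
    simp
  · rw [pvRightA, dif_neg h]
    conv_rhs => rw [pvCollectB, dif_neg h]
    simp
termination_by (((pvRowA grid row).length : Int) - right).toNat
decreasing_by all_goals omega

-- A's left scan: the accumulator moves out back.
theorem pvLeftA_acc (grid : List String) (row : Int) (left : Int) (acc : List Char) :
    pvLeftA grid row left acc = pvLeftA grid row left [] ++ acc := by
  by_cases h : 0 ≤ left ∧ PySem.Chars.isdigit ((PySem.List.pyGet? (pvRowA grid row) left).getD ' ') = true
  · rw [pvLeftA, dif_pos h]
    conv_rhs => rw [pvLeftA, dif_pos h]
    rw [pvLeftA_acc grid row (left - 1) (_ :: acc), pvLeftA_acc grid row (left - 1) (_ :: [])]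
    simp
  · rw [pvLeftA, dif_neg h]
    conv_rhs => rw [pvLeftA, dif_neg h]
    simp
termination_by (left + 1).toNat
decreasing_by all_goals omega

-- Gluing lemma: A's left part followed by A's right part (= B's scan from left+1) is
-- exactly B's single forward scan started at the index B's pointer walk finds.
theorem pvLeft_glue (grid : List String) (row : Int) (left : Int) :
    pvLeftA grid row left [] ++ pvCollectB (pvRowA grid row) (left + 1) []
      = pvCollectB (pvRowA grid row) (pvStartB (pvRowA grid row) left) [] := by
  by_cases h : 0 ≤ left ∧ PySem.Chars.isdigit ((PySem.List.pyGet? (pvRowA grid row) left).getD ' ') = true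
  · have hlt : left < ((pvRowA grid row).length : Int) := by
      by_contra hge
      have hnone : PySem.List.pyGet? (pvRowA grid row) left = none := by
        rw [PySem.List.pyGet?_eq_none_iff]
        simp [PySem.Raise.InRange]
        omega
      rw [hnone] at h
      simp [PySem.Chars.isdigit] at h
    rw [pvLeftA, dif_pos h, pvLeftA_acc, pvStartB, dif_pos h]
    have hmid : pvCollectB (pvRowA grid row) left []
        = ((PySem.List.pyGet? (pvRowA grid row) left).getD ' ')
            :: pvCollectB (pvRowA grid row) (left + 1) [] := by
      rw [pvCollectB, dif_pos ⟨hlt, h.2⟩, pvCollectB_acc]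
      simp
    calc (pvLeftA grid row (left - 1) [] ++ [(PySem.List.pyGet? (pvRowA grid row) left).getD ' ']) ++ pvCollectB (pvRowA grid row) (left + 1) []
        = pvLeftA grid row (left - 1) [] ++ pvCollectB (pvRowA grid row) left [] := by
          rw [hmid, List.append_assoc]; rfl
      _ = pvCollectB (pvRowA grid row) (pvStartB (pvRowA grid row) (left - 1)) [] := by
          have ih := pvLeft_glue grid row (left - 1)
          simpa [show left - 1 + 1 = left by omega] using ih
  · rw [pvLeftA, dif_neg h, pvStartB, dif_neg h, List.nil_append]
termination_by (left + 1).toNat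
decreasing_by all_goals omega

-- ===== VERDICT (by name: the statement is the Claim_ definition above) =====
theorem find_horizontal_number_spec : Claim_equal_find_horizontal_number := by
  intro grid row col _ _
  unfold Spec_find_horizontal_number find_horizontal_number find_horizontal_number_alt
  show (if pvLeftA grid row col [] ≠ [] then
          String.ofList (pvLeftA grid row col [] ++ pvRightA grid row (col + 1) [])
        else String.ofList (pvRightA grid row (col + 1) [])) = _
  rw [pvRightA_eq_collect, List.nil_append]
  by_cases hnl : pvLeftA grid row col [] = []
  · rw [if_neg (by simp [hnl])]
    rw [show pvCollectB (pvRowA grid row) (col + 1) []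
          = pvLeftA grid row col [] ++ pvCollectB (pvRowA grid row) (col + 1) [] by
        rw [hnl, List.nil_append], pvLeft_glue]
    rfl
  · rw [if_pos hnl, pvLeft_glue]
    rfl
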